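-- pv_equiv track=rewrite | github.com/poonguzhaliarumugam/Python | animal_crackers.py | animal_crackers
-- ===== SOURCE A (Python) =====
-- def animal_crackers(text):
--   text=text.split()
--   i=0
--
--   for splittext in text:
--      if i==0:
--        y=splittext[0]
--        i+=1
--      elif splittext[0]==y:
--         return True
--      else:
--         return False
-- ===== SOURCE B (Python) =====
-- def animal_crackers(text):
--     words = text.split()
--     if len(words) < 2:
--         return None
--     return words[0][0] == words[1][0]
-- ===== Notes on version B (the rewrite author's own statement) =====
-- stated objective: simpler
-- what changed: Replaces the stateful loop over all words (with a counter and an early return on the second word) by a length guard plus direct indexing of the first two words.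
import Mathlib
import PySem

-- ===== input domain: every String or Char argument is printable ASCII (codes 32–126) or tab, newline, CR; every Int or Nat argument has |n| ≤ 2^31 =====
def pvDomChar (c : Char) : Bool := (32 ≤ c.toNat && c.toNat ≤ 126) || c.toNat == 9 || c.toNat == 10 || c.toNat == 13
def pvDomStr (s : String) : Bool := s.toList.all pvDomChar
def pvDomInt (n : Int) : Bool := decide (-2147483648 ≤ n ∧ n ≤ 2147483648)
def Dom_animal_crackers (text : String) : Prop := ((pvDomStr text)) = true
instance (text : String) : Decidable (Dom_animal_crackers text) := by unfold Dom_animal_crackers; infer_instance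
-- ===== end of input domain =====

-- B replaces A's counter-driven loop with a length guard plus direct indexing of the
-- first two words (objective: simpler).

-- ===== PORT A =====
-- A's for-loop with counter i and captured y, as structural recursion over the word list.
def animal_crackers_loop (ws : List String) (i : Int) (y : Option Char) : Option Bool :=
  match ws with
  | [] => none
  | w :: rest =>
    if i = 0 then
      animal_crackers_loop rest (i + 1) (PySem.Str.pyGet? w 0)
    else if PySem.Str.pyGet? w 0 = y then some true
    else some false

def animal_crackers (text : String) : Option Bool :=
  animal_crackers_loop (PySem.Str.split₀ text) 0 none

-- ===== PORT B =====
def animal_crackers_alt (text : String) : Option Bool :=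
  let words := PySem.Str.split₀ text
  match words with
  | w0 :: w1 :: _ => some (PySem.Str.pyGet? w0 0 == PySem.Str.pyGet? w1 0)
  | _ => none

-- ===== PRECONDITION & SPEC =====
def Spec_animal_crackers (text : String) (out : Option Bool) : Prop := out = animal_crackers_alt text
instance (text : String) (out : Option Bool) : Decidable (Spec_animal_crackers text out) := by unfold Spec_animal_crackers; infer_instance

-- ===== CLAIM (what is proved, stated in full; the proofs are below) =====
def Claim_equal_animal_crackers : Prop := ∀ (text : String), Dom_animal_crackers text → Spec_animal_crackers text (animal_crackers text)

-- ===== LEMMAS AND PROOFS =====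

-- ===== VERDICT (by name: the statement is the Claim_ definition above) =====
theorem animal_crackers_spec : Claim_equal_animal_crackers := by
  intro text _
  unfold Spec_animal_crackers animal_crackers animal_crackers_alt
  cases h : PySem.Str.split₀ text with
  | nil => simp [animal_crackers_loop]
  | cons w0 rest =>
    cases rest with
    | nil => simp [animal_crackers_loop]
    | cons w1 rest' =>
      simp only [animal_crackers_loop]
      norm_num
      split_ifs with hc
      · simp [hc]
      · rw [eq_comm] at hc
        simp [beq_eq_false_iff_ne, hc]
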